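-- pv_equiv track=rewrite | github.com/gilliankerr/KoNote-Redux | tests/utils/page_capture.py | expand_personas
-- ===== SOURCE A (Python) =====
-- PERSONA_MAP = {
--     "R1": "frontdesk",
--     "R2": "frontdesk2",
--     "R2-FR": "frontdesk_fr",
--     "DS1": "staff",
--     "DS1b": "staff_new",
--     "DS1c": "staff_adhd",
--     "DS2": "staff_fr",
--     "DS3": "staff_a11y",
--     "DS4": "staff_voice",
--     "E1": "executive",
--     "E2": "admin2",
--     "PM1": "program_mgr",
--     "admin": "admin",
-- }
--
-- def expand_personas(authorized_personas):
--     """Expand special persona tokens to concrete persona IDs.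
--
--     "all_authenticated" → all personas in PERSONA_MAP
--     "all" → all personas in PERSONA_MAP
--     "unauthenticated" → kept as-is (handled by caller)
--
--     Returns:
--         list[str] of persona IDs.
--     """
--     expanded = []
--     for p in authorized_personas:
--         if p in ("all_authenticated", "all"):
--             expanded.extend(PERSONA_MAP.keys())
--         else:
--             expanded.append(p)
--     # Deduplicate while preserving order
--     seen = set()
--     result = []
--     for p in expanded:
--         if p not in seen:
--             seen.add(p)
--             result.append(p)
--     return result
-- ===== SOURCE B (Python) =====
-- PERSONA_MAP = {
--     "R1": "frontdesk",
--     "R2": "frontdesk2",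
--     "R2-FR": "frontdesk_fr",
--     "DS1": "staff",
--     "DS1b": "staff_new",
--     "DS1c": "staff_adhd",
--     "DS2": "staff_fr",
--     "DS3": "staff_a11y",
--     "DS4": "staff_voice",
--     "E1": "executive",
--     "E2": "admin2",
--     "PM1": "program_mgr",
--     "admin": "admin",
-- }
--
-- def expand_personas(authorized_personas):
--     """Single pass: expand tokens and deduplicate on the fly (no intermediate list)."""
--     seen = set()
--     result = []
--     for p in authorized_personas:
--         if p in ("all_authenticated", "all"):
--             for k in PERSONA_MAP:
--                 if k not in seen:
--                     seen.add(k)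
--                     result.append(k)
--         elif p not in seen:
--             seen.add(p)
--             result.append(p)
--     return result
-- ===== Notes on version B (the rewrite author's own statement) =====
-- stated objective: simpler
-- what changed: B fuses A's two sequential passes (build an intermediate expanded list, then deduplicate it) into a single loop over authorized_personas that appends each persona directly to the result under a seen-set check, with no intermediate list.
import Mathlib
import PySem

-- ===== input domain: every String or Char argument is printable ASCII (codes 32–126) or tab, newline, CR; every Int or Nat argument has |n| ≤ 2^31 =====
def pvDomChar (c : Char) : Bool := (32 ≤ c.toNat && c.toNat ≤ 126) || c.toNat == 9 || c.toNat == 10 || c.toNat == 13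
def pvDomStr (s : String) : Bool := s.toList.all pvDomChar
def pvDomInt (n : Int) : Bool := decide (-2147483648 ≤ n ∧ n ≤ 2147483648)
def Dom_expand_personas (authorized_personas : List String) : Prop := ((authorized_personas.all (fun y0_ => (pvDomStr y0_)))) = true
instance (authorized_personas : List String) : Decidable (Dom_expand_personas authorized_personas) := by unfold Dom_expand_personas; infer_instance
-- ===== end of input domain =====

-- B fuses A's two sequential passes (expand, then dedup) into one loop with a seen-set; same return value, no intermediate list (objective: simpler/alternative).

-- ===== PORT A =====
-- PERSONA_MAP.keys() (insertion order)
def personaKeys : List String :=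
  ["R1", "R2", "R2-FR", "DS1", "DS1b", "DS1c", "DS2", "DS3", "DS4", "E1", "E2", "PM1", "admin"]

def expand_personas (authorized_personas : List String) : List String :=
  -- first pass: build 'expanded'
  let expanded : List String := authorized_personas.foldl
    (fun acc p => if p == "all_authenticated" || p == "all" then acc ++ personaKeys else acc ++ [p]) []
  -- second pass: deduplicate while preserving order
  let fin : PySem.Set String × List String := expanded.foldl
    (fun st p => if PySem.Set.contains st.1 p then st else (PySem.Set.add st.1 p, st.2 ++ [p]))
    (PySem.Set.empty, [])
  fin.2

-- ===== PORT B =====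
-- 'if p not in seen: seen.add(p); result.append(p)' (B's loop body, used for both branches)
def pushNew (st : PySem.Set String × List String) (p : String) : PySem.Set String × List String :=
  if PySem.Set.contains st.1 p then st else (PySem.Set.add st.1 p, st.2 ++ [p])

def expand_personas_alt (authorized_personas : List String) : List String :=
  (authorized_personas.foldl
    (fun st p =>
      if p == "all_authenticated" || p == "all" then personaKeys.foldl pushNew st
      else pushNew st p)
    (PySem.Set.empty, [])).2

-- ===== PRECONDITION & SPEC =====
def Spec_expand_personas (authorized_personas : List String) (out : List String) : Prop := out = expand_personas_alt authorized_personas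
instance (authorized_personas : List String) (out : List String) : Decidable (Spec_expand_personas authorized_personas out) := by unfold Spec_expand_personas; infer_instance

-- ===== CLAIM (what is proved, stated in full; the proofs are below) =====
def Claim_equal_expand_personas : Prop := ∀ (authorized_personas : List String), Dom_expand_personas authorized_personas → Spec_expand_personas authorized_personas (expand_personas authorized_personas)

-- ===== LEMMAS AND PROOFS =====

-- A's expansion of one token
def expOne (p : String) : List String :=
  if p == "all_authenticated" || p == "all" then personaKeys else [p]

-- A's dedup step is B's pushNew
theorem dedup_step_eq : (fun (st : PySem.Set String × List String) p =>
    if PySem.Set.contains st.1 p then st else (PySem.Set.add st.1 p, st.2 ++ [p])) = pushNew := by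
  funext st p; simp [pushNew]

-- A's first pass builds the concatenation of the per-token expansions
theorem expanded_eq (xs : List String) (acc : List String) :
    xs.foldl (fun acc p => if p == "all_authenticated" || p == "all" then acc ++ personaKeys else acc ++ [p]) acc
      = acc ++ xs.flatMap expOne := by
  induction xs generalizing acc with
  | nil => simp
  | cons x xs ih =>
    simp only [List.foldl_cons, List.flatMap_cons, ih, expOne]
    split <;> simp

-- folding pushNew over a flatMap = the fused per-token fold
theorem foldl_flatMap (xs : List String) (st : PySem.Set String × List String) :
    (xs.flatMap expOne).foldl pushNew st
      = xs.foldl (fun st p => if p == "all_authenticated" || p == "all" then personaKeys.foldl pushNew st else pushNew st p) st := by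
  induction xs generalizing st with
  | nil => rfl
  | cons x xs ih =>
    simp only [List.flatMap_cons, List.foldl_append, List.foldl_cons, ih, expOne]
    split <;> simp

-- ===== VERDICT (by name: the statement is the Claim_ definition above) =====
theorem expand_personas_spec : Claim_equal_expand_personas := by
  intro aps _
  show _ = _
  unfold expand_personas expand_personas_alt
  rw [expanded_eq aps [], dedup_step_eq, List.nil_append]
  simp only [foldl_flatMap]
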